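-- pv_equiv track=rewrite | github.com/TheFenix2000/pp1 | 13-Test3/p1.py | f
-- ===== SOURCE A (Python) =====
-- def f(n):
--     res = ""
--     couter = 0
--     if n > 0:
--         while n > 0:
--
--             res+="/"
--             couter+=1
--             n-=1
--             if couter % 5 == 0 and n != 0:
--                 couter=0
--                 res += "-"
--
--     return res
-- ===== SOURCE B (Python) =====
-- def f(n):
--     if n <= 0:
--         return ""
--     chunks = ["/" * min(5, n - i) for i in range(0, n, 5)]
--     return "-".join(chunks)
-- ===== Notes on version B (the rewrite author's own statement) =====
-- stated objective: simpler
-- what changed: Replaces the char-by-char while loop with a modulo counter and conditional dash insertion by building the list of slash blocks over group start indices and joining them with '-', which also avoids quadratic repeated string concatenation.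
import Mathlib
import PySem

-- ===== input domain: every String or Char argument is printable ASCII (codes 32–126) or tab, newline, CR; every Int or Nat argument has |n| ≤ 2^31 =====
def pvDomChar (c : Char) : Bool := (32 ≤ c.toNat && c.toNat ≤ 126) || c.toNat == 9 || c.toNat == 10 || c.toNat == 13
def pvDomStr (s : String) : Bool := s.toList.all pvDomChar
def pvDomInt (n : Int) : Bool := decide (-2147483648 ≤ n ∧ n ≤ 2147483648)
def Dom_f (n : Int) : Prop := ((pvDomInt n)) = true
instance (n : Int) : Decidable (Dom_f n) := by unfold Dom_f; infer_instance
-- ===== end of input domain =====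

-- B builds the list of 5-slash blocks over group start indices and joins with "-",
-- instead of A's char-by-char loop with a modulo counter; objective: simpler.


-- ===== PORT A =====
-- while n > 0: res += "/"; couter += 1; n -= 1; if couter % 5 == 0 and n != 0: couter = 0; res += "-"
-- the remaining iteration count n is the Nat argument (decremented each pass, exactly as the Python decrements n)
def loopA : Nat → String → Nat → String
  | 0, res, _ => res
  | m + 1, res, couter =>
    let res1 := res ++ "/"
    let c1 := couter + 1
    if c1 % 5 = 0 ∧ m ≠ 0 then loopA m (res1 ++ "-") 0 else loopA m res1 c1

def f (n : Int) : String :=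
  if n > 0 then loopA n.toNat "" 0 else ""

-- ===== PORT B =====
def f_alt (n : Int) : String :=
  if n ≤ 0 then ""
  else
    let chunks := (PySem.List.pyRange 0 n 5).map
      (fun i => String.mk (List.replicate (min 5 (n - i)).toNat '/'))
    PySem.Str.join "-" chunks

-- ===== PRECONDITION & SPEC =====
def Spec_f (n : Int) (out : String) : Prop := out = f_alt n
instance (n : Int) (out : String) : Decidable (Spec_f n out) := by unfold Spec_f; infer_instance

-- ===== CLAIM (what is proved, stated in full; the proofs are below) =====
def Claim_equal_f : Prop := ∀ (n : Int), Dom_f n → Spec_f n (f n)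

-- ===== LEMMAS AND PROOFS =====

-- the accumulator is only ever prefixed
theorem loopA_prefix (m : Nat) : ∀ (res : String) (c : Nat),
    loopA m res c = res ++ loopA m "" c := by
  induction m with
  | zero => intro res c; simp [loopA]
  | succ m ih =>
    intro res c
    simp only [loopA]
    by_cases h : (c + 1) % 5 = 0 ∧ m ≠ 0
    · simp only [if_pos h]
      rw [ih (res ++ "/" ++ "-"), ih ("" ++ "/" ++ "-")]
      simp [String.append_assoc, String.empty_append]
    · simp only [if_neg h]
      rw [ih (res ++ "/"), ih ("" ++ "/")]
      simp [String.append_assoc, String.empty_append]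

-- five unrollings of the loop starting from counter 0, with at least one iteration left
theorem keyA (k : Nat) (hk : k ≠ 0) :
    loopA (k + 5) "" 0 = "/////-" ++ loopA k "" 0 := by
  show loopA (k + 4 + 1) "" 0 = _
  rw [loopA]; norm_num
  rw [show k + 4 = k + 3 + 1 from rfl, loopA]; norm_num
  rw [show k + 3 = k + 2 + 1 from rfl, loopA]; norm_num
  rw [show k + 2 = k + 1 + 1 from rfl, loopA]; norm_num
  rw [loopA]; norm_num
  rw [if_neg hk,
      loopA_prefix k ("/" ++ "/" ++ "/" ++ "/" ++ "/" ++ "-") 0]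
  congr 1

theorem range_count (n : Int) (h : 5 < n) :
    ((n - 0 + 5 - 1) / 5).toNat = ((n - 5 - 0 + 5 - 1) / 5).toNat + 1 := by
  omega

-- the chunk list of n (n > 5) is "/////" followed by the chunk list of n - 5
theorem keyB (n : Int) (h : 5 < n) :
    f_alt n = "/////-" ++ f_alt (n - 5) := by
  apply String.toList_inj.mp
  have h1 : ¬ n ≤ 0 := by omega
  have h2 : ¬ n - 5 ≤ 0 := by omega
  simp only [f_alt, if_neg h1, if_neg h2]
  rw [PySem.List.pyRange_of_pos 0 n (by norm_num : (0:Int) < 5),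
      PySem.List.pyRange_of_pos 0 (n - 5) (by norm_num : (0:Int) < 5)]
  rw [if_pos (by omega : (0:Int) < n)]
  by_cases h3 : (0:Int) < n - 5
  · rw [if_pos h3, range_count n h, List.range_succ_eq_map]
    have hmin : min 5 (n - (0 + 5 * ((0:Nat) : Int))) = 5 := by push_cast; omega
    simp only [List.map_cons, List.map_map]
    have htail : (List.range ((n - 5 - 0 + 5 - 1) / 5).toNat).map
          ((fun i => String.mk (List.replicate (min 5 (n - i)).toNat '/')) ∘
            (fun k : Nat => (0:Int) + 5 * (k:Int)) ∘ Nat.succ)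
        = (List.range ((n - 5 - 0 + 5 - 1) / 5).toNat).map
          ((fun i => String.mk (List.replicate (min 5 (n - 5 - i)).toNat '/')) ∘
            (fun k : Nat => (0:Int) + 5 * (k:Int))) := by
      apply List.map_congr_left
      intro k _
      simp only [Function.comp]
      congr 2
      push_cast
      omega
    rw [htail]
    -- the tail list is nonempty: its range has length ≥ 1
    have hlen : ((n - 5 - 0 + 5 - 1) / 5).toNat ≠ 0 := by omega
    obtain ⟨K, hK⟩ : ∃ K, ((n - 5 - 0 + 5 - 1) / 5).toNat = K + 1 :=
      ⟨_, (Nat.succ_pred_eq_of_pos (Nat.pos_of_ne_zero hlen)).symm⟩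
    rw [hK, List.range_succ_eq_map]
    simp only [String.toList_append, PySem.Str.toList_join, List.map_cons, List.map_map,
      PySem.Chars.join_cons_cons, hmin]
    rfl
  · exfalso; omega

-- n in 1..5: a single chunk on both sides
theorem small (n : Int) (h0 : 0 < n) (h5 : n ≤ 5) : f n = f_alt n := by
  interval_cases n <;> decide

theorem main : ∀ (k : Nat) (n : Int), 0 < n → n.toNat ≤ k → f n = f_alt n := by
  intro k
  induction k with
  | zero => intro n h0 hk; omega
  | succ k ih =>
    intro n h0 hk
    by_cases h5 : n ≤ 5
    · exact small n h0 h5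
    · push_neg at h5
      have hA : f n = "/////-" ++ f (n - 5) := by
        have hn : n.toNat = (n - 5).toNat + 5 := by omega
        simp only [f, if_pos (by omega : n > 0), if_pos (by omega : n - 5 > 0), hn]
        exact keyA _ (by omega)
      rw [hA, ih (n - 5) (by omega) (by omega), ← keyB n h5]

-- ===== VERDICT (by name: the statement is the Claim_ definition above) =====
theorem f_spec : Claim_equal_f := by
  intro n _
  unfold Spec_f
  by_cases h0 : 0 < n
  · exact main n.toNat n h0 le_rfl
  · simp only [f, f_alt, if_neg (show ¬ n > 0 by omega), if_pos (show n ≤ 0 by omega)]
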